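-- pv_equiv track=rewrite | github.com/Adesh856/GA101_Masai | Sprint1/day2/Python/app.py | mapingnoncaseing
-- ===== SOURCE A (Python) =====
-- def mapingnoncaseing(list):
--     dict={}
--     for string in list:
--         s=string.lower()
--         if s not in dict:
--             dict[s]=1
--         else:
--             dict[s]+=1
--
--     return dict
-- ===== SOURCE B (Python) =====
-- def mapingnoncaseing(list):
--     lows = [s.lower() for s in list]
--     return {k: lows.count(k) for k in dict.fromkeys(lows)}
-- ===== Notes on version B (the rewrite author's own statement) =====
-- stated objective: idiomatic
-- what changed: Replaces the incremental if/else counting loop with a declarative build: lowercase once, dedup keys in first-occurrence order via dict.fromkeys, and map each key to its total count in one comprehension.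
import Mathlib
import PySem

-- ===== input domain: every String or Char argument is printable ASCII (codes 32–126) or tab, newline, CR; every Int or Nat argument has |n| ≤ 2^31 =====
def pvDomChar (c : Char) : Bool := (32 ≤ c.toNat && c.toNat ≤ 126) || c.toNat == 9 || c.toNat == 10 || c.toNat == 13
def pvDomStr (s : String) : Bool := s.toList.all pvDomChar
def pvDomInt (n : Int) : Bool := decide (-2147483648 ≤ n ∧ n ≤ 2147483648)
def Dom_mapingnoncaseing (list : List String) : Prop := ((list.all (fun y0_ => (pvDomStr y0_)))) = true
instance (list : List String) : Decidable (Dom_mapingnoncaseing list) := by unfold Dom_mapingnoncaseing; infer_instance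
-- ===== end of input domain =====

-- B replaces A's incremental if/else counting loop with lowercase-once, ordered dedup, count-per-key (idiomatic, not faster).
-- ===== PORT A =====
-- for string in list: s = string.lower(); if s not in dict: dict[s]=1 else: dict[s]+=1; return dict
def mapingnoncaseing (list : List String) : List (String × Int) :=
  (list.foldl (fun d string =>
      let s := PySem.Str.lower string
      if d.contains s then d.insert s (d.getD s 0 + 1) else d.insert s 1)
    PySem.Dict.empty).items

-- ===== PORT B =====
-- lows = [s.lower() for s in list]; {k: lows.count(k) for k in dict.fromkeys(lows)}
def mapingnoncaseing_alt (list : List String) : List (String × Int) :=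
  let lows := list.map PySem.Str.lower
  (PySem.List.dedup lows).map (fun k => (k, (lows.count k : Int)))

-- ===== PRECONDITION & SPEC =====
def Spec_mapingnoncaseing (list : List String) (out : List (String × Int)) : Prop := out = mapingnoncaseing_alt list
instance (list : List String) (out : List (String × Int)) : Decidable (Spec_mapingnoncaseing list out) := by unfold Spec_mapingnoncaseing; infer_instance

-- ===== CLAIM (what is proved, stated in full; the proofs are below) =====
def Claim_equal_mapingnoncaseing : Prop := ∀ (list : List String), Dom_mapingnoncaseing list → Spec_mapingnoncaseing list (mapingnoncaseing list)

-- ===== LEMMAS AND PROOFS =====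

-- ===== VERDICT (by name: the statement is the Claim_ definition above) =====
-- A's loop body equals the canonical counter step (in the 'not contains' branch getD is 0)
lemma step_eq (d : PySem.Dict String Int) (s : String) :
    (if d.contains s then d.insert s (d.getD s 0 + 1) else d.insert s 1)
    = d.insert s (d.getD s 0 + 1) := by
  by_cases h : d.contains s
  · simp [h]
  · simp only [Bool.not_eq_true] at h
    simp [h, PySem.Dict.getD_of_not_contains]

-- fuse A's 'lower inside the loop' with B's 'lower once, then fold'
lemma fold_lower (l : List String) (d : PySem.Dict String Int) :
    List.foldl (fun (d : PySem.Dict String Int) (string : String) =>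
        d.insert (PySem.Str.lower string) (d.getD (PySem.Str.lower string) 0 + 1)) d l
    = List.foldl (fun d x => d.insert x (d.getD x 0 + 1)) d (l.map PySem.Str.lower) := by
  induction l generalizing d with
  | nil => rfl
  | cons a t ih => simp [ih]

theorem mapingnoncaseing_spec : Claim_equal_mapingnoncaseing := by
  intro list _
  show mapingnoncaseing list = mapingnoncaseing_alt list
  simp only [mapingnoncaseing, mapingnoncaseing_alt, step_eq]
  rw [fold_lower, PySem.Dict.foldl_insert_getD_add_one_eq_counter, PySem.Dict.items_counter]
  simp [PySem.List.dedup_eq_ofList]
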